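-- pv_equiv track=rewrite | github.com/wanbin2014/dolphin | dolphin/mmseg/complex.py | largest_avg_word_len
-- ===== SOURCE A (Python) =====
-- def largest_avg_word_len(chunks):
--
--     min_chunk_size = 3
--     for chunk in chunks:
--         if len(chunk) < min_chunk_size:
--             min_chunk_size = len(chunk)
--     if min_chunk_size == 3:
--         return chunks
--
--     eq_size_chunks = list()
--     for chunk in chunks:
--         if len(chunk) == min_chunk_size:
--             eq_size_chunks.append(chunk)
--
--     return eq_size_chunks
-- ===== SOURCE B (Python) =====
-- def largest_avg_word_len(chunks):
--     # Bucket chunks by length once, then index the minimum-length bucket.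
--     buckets = {}
--     for chunk in chunks:
--         buckets.setdefault(len(chunk), []).append(chunk)
--     m = min(buckets, default=3)
--     if m < 3:
--         return buckets[m]
--     return chunks
-- ===== Notes on version B (the rewrite author's own statement) =====
-- stated objective: alternative
-- what changed: B groups the chunks into a dict of buckets keyed by length in one pass and returns the bucket of the capped-minimum key, instead of A's two separate scans (one to find the minimum and one to filter).
import Mathlib
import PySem

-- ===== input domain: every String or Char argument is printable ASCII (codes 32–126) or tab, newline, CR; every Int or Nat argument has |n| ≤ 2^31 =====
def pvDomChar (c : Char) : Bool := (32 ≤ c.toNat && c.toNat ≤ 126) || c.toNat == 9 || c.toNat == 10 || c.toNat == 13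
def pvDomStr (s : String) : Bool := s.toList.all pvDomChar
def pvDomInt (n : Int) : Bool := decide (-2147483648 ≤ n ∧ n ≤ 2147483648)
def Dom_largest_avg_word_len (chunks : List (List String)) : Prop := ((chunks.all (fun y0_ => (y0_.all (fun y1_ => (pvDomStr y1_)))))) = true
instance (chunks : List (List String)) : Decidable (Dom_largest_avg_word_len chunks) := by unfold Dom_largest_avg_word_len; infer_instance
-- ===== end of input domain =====

-- B changes the decomposition: one grouping pass into length-keyed buckets plus an index
-- into the minimum bucket, instead of A's min-scan followed by a filter-scan (same cost).

-- ===== PORT A =====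
def largest_avg_word_len (chunks : List (List String)) : List (List String) :=
  let m := chunks.foldl (fun acc c => if (c.length : Int) < acc then (c.length : Int) else acc) 3
  if m = 3 then chunks
  else chunks.foldl (fun acc c => if (c.length : Int) == m then acc ++ [c] else acc) ([] : List (List String))

-- ===== PORT B =====
-- buckets.setdefault(len(chunk), []).append(chunk) is the grouping loop d.modify (len c) [] (· ++ [c]);
-- buckets[m] is ported as get? (cannot be none here: m < 3 only when m is a key) defaulted to [].
def largest_avg_word_len_alt (chunks : List (List String)) : List (List String) :=
  let buckets := chunks.foldl (fun d c => d.modify ((c.length : Int)) [] (· ++ [c])) (PySem.Dict.empty)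
  let m := PySem.List.minD buckets.keys (fun k => k) 3
  if m < 3 then (buckets.get? m).getD [] else chunks

-- ===== PRECONDITION & SPEC =====
def Spec_largest_avg_word_len (chunks : List (List String)) (out : List (List String)) : Prop := out = largest_avg_word_len_alt chunks
instance (chunks : List (List String)) (out : List (List String)) : Decidable (Spec_largest_avg_word_len chunks out) := by unfold Spec_largest_avg_word_len; infer_instance

-- ===== CLAIM (what is proved, stated in full; the proofs are below) =====
def Claim_equal_largest_avg_word_len : Prop := ∀ (chunks : List (List String)), Dom_largest_avg_word_len chunks → Spec_largest_avg_word_len chunks (largest_avg_word_len chunks)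

-- ===== LEMMAS AND PROOFS =====

-- A's running-minimum loop is the fold of `min` over the chunk lengths.
theorem pvA_min_eq (chunks : List (List String)) :
    chunks.foldl (fun acc c => if (c.length : Int) < acc then (c.length : Int) else acc) 3
      = (chunks.map (fun c => ((c.length : Nat) : Int))).foldl min 3 := by
  rw [List.foldl_map]
  congr 1
  funext a c
  simp only [min_def]
  split_ifs <;> omega

-- B's bucket keys are the distinct chunk lengths in first-occurrence order.
theorem pvB_keys (chunks : List (List String)) :
    (chunks.foldl (fun d c => d.modify ((c.length : Int)) [] (· ++ [c])) (PySem.Dict.empty)).keys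
      = PySem.Set.ofList (chunks.map (fun c => ((c.length : Nat) : Int))) := by
  rw [PySem.Dict.keys_foldl_modify_key chunks (fun c => ((c.length : Nat) : Int)) [] (fun _ c => (· ++ [c]))]
  rfl

-- Looking a length up in the buckets yields exactly the chunks of that length.
theorem pvB_getD (chunks : List (List String)) (m : Int) :
    (chunks.foldl (fun d c => d.modify ((c.length : Int)) [] (· ++ [c])) (PySem.Dict.empty)).getD m []
      = chunks.filter (fun c => (c.length : Int) == m) := by
  have h : chunks.foldl (fun d c => d.modify ((c.length : Int)) [] (· ++ [c])) (PySem.Dict.empty)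
      = (chunks.map (fun c => (((c.length : Nat) : Int), c))).foldl
          (fun d p => d.modify p.1 [] (· ++ [p.2])) (PySem.Dict.empty) := by
    rw [List.foldl_map]
  rw [h, PySem.Dict.getD_foldl_modify_append]
  simp [List.filter_map, Function.comp_def]

theorem pv_main (chunks : List (List String)) :
    largest_avg_word_len chunks = largest_avg_word_len_alt chunks := by
  simp only [largest_avg_word_len, largest_avg_word_len_alt]
  rw [pvA_min_eq, pvB_keys]
  by_cases hnil : chunks = []
  · subst hnil
    simp [PySem.List.minD, PySem.List.min?]
  · obtain ⟨c0, t, hc⟩ := List.exists_cons_of_ne_nil hnil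
    set ls := chunks.map (fun c => ((c.length : Nat) : Int)) with hls
    set mA := ls.foldl min 3 with hmA
    have hminA : PySem.List.min? (3 :: ls) (fun y => y) = some mA :=
      PySem.List.min?_id_cons 3 ls
    have hAle : ∀ y ∈ (3 :: ls), mA ≤ y := PySem.List.min?_isMin hminA
    have hAmem : mA ∈ (3 :: ls) := PySem.List.min?_mem hminA
    have hAle3 : mA ≤ 3 := hAle 3 (by simp)
    have hmem0 : ((c0.length : Nat) : Int) ∈ ls := by
      rw [hls, hc]; simp
    -- the minimum of the (nonempty) key set
    cases hk : PySem.Set.ofList ls with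
    | nil =>
      exfalso
      have := (PySem.Set.mem_ofList ls ((c0.length : Nat) : Int)).mpr hmem0
      rw [hk] at this
      simp at this
    | cons k kt =>
      have hmin? : PySem.List.min? (PySem.Set.ofList ls) (fun k => k) = some (kt.foldl min k) := by
        rw [hk]; exact PySem.List.min?_id_cons k kt
      set mB := kt.foldl min k with hmB
      have hBD : PySem.List.minD (k :: kt) (fun k => k) 3 = mB := by
        simp [PySem.List.minD, PySem.List.min?_id_cons k kt, hmB]
      have hBmem : mB ∈ ls := by
        have := PySem.List.min?_mem hmin?
        rwa [PySem.Set.mem_ofList] at this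
      have hBle : ∀ y ∈ ls, mB ≤ y := by
        intro y hy
        exact PySem.List.min?_isMin hmin? y ((PySem.Set.mem_ofList ls y).mpr hy)
      rw [hBD]
      by_cases h3 : mA = 3
      · have hle : mA ≤ mB := hAle mB (by simp [hBmem])
        rw [if_pos h3, if_neg (by omega)]
      · have hAls : mA ∈ ls := by
          rcases List.mem_cons.mp hAmem with h | h
          · exact absurd h h3
          · exact h
        have hEq : mB = mA := le_antisymm (hBle mA hAls) (hAle mB (by simp [hBmem]))
        have hlt : mB < 3 := by omega
        rw [if_neg h3, if_pos hlt, hEq, ← PySem.Dict.getD_eq_get?_getD, pvB_getD]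
        rw [PySem.List.foldl_append_if]
        simp

-- ===== VERDICT (by name: the statement is the Claim_ definition above) =====
theorem largest_avg_word_len_spec : Claim_equal_largest_avg_word_len := by
  intro chunks _
  unfold Spec_largest_avg_word_len
  exact pv_main chunks
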